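-- pv_equiv track=rewrite | github.com/DrDonut326/AdventofCode | 2016/Day 24.py | get_travels_lists
-- ===== SOURCE A (Python) =====
-- from itertools import permutations, combinations
--
-- def get_travels_lists(POI_list, start):
--     ans = []
--
--     # Get combinations of POIs
--     perms = permutations(POI_list, len(POI_list))
--
--     # Insert start to the beginning of each one
--     for p in perms:
--         travel = [start]
--         for pos in p:
--             travel.append(pos)
--         ans.append(travel)
--
--     return ans
-- ===== SOURCE B (Python) =====
-- def get_travels_lists(POI_list, start):
--     # Recursive permutation generation (no itertools): extend the partial
--     # path with each remaining POI by position, in left-to-right index order.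
--     ans = []
--
--     def rec(path, remaining):
--         if not remaining:
--             ans.append(path)
--             return
--         for i in range(len(remaining)):
--             rec(path + [remaining[i]], remaining[:i] + remaining[i + 1:])
--
--     rec([start], POI_list)
--     return ans
-- ===== Notes on version B (the rewrite author's own statement) =====
-- stated objective: alternative
-- what changed: Replaces itertools.permutations plus a prefix-insertion loop by a direct recursive backtracking generator that grows the path from [start] and removes the chosen POI by position, emitting each full path directly.
import Mathlib
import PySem

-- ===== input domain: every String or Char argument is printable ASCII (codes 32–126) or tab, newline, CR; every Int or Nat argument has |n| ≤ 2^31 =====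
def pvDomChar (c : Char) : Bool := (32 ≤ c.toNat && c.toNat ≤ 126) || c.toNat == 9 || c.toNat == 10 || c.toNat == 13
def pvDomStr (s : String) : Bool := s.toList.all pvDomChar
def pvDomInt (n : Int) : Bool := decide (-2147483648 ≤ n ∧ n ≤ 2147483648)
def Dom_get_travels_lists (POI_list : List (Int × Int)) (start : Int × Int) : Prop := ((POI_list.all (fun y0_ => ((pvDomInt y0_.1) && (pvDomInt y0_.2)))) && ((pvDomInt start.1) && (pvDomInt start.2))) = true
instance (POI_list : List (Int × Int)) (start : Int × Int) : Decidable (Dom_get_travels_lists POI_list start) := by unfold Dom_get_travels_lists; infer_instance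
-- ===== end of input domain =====

-- B replaces itertools.permutations + a prefix loop by a recursive backtracking
-- generator growing the path from [start]; alternative decomposition, not faster.


-- ===== PORT A =====
-- perms = permutations(POI_list, len(POI_list)); then for each p build
-- travel = [start]; append each pos; append travel to ans.
def get_travels_lists (POI_list : List (Int × Int)) (start : Int × Int) : List (List (Int × Int)) :=
  let perms := PySem.List.permutations POI_list POI_list.length
  perms.foldl
    (fun ans p =>
      let travel := p.foldl (fun t pos => t ++ [pos]) [start]
      ans ++ [travel])
    []

-- ===== PORT B =====
-- rec(path, remaining): if remaining empty emit path, else for i in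
-- range(len(remaining)) recurse with remaining[i] appended and removed by position.
def pvRec (path : List (Int × Int)) (remaining : List (Int × Int)) : List (List (Int × Int)) :=
  if remaining = [] then [path]
  else
    (List.range remaining.length).attach.flatMap fun i =>
      pvRec (path ++ [remaining.getD i.1 (0, 0)]) (remaining.take i.1 ++ remaining.drop (i.1 + 1))
termination_by remaining.length
decreasing_by
  have : i.1 < remaining.length := List.mem_range.mp i.2
  simp [List.length_take, List.length_drop]
  omega

def get_travels_lists_alt (POI_list : List (Int × Int)) (start : Int × Int) : List (List (Int × Int)) :=
  pvRec [start] POI_list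

-- ===== PRECONDITION & SPEC =====
def Spec_get_travels_lists (POI_list : List (Int × Int)) (start : Int × Int) (out : List (List (Int × Int))) : Prop := out = get_travels_lists_alt POI_list start
instance (POI_list : List (Int × Int)) (start : Int × Int) (out : List (List (Int × Int))) : Decidable (Spec_get_travels_lists POI_list start out) := by unfold Spec_get_travels_lists; infer_instance

-- ===== CLAIM (what is proved, stated in full; the proofs are below) =====
def Claim_equal_get_travels_lists : Prop := ∀ (POI_list : List (Int × Int)) (start : Int × Int), Dom_get_travels_lists POI_list start → Spec_get_travels_lists POI_list start (get_travels_lists POI_list start)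

-- ===== LEMMAS AND PROOFS =====

theorem pv_flatMap_attach {α β : Type} (l : List α) (g : α → List β) :
    l.attach.flatMap (fun x => g x.1) = l.flatMap g := by
  conv_rhs => rw [← List.attach_map_subtype_val l]
  rw [List.flatMap_map]

theorem pv_inner_foldl (p : List (Int × Int)) (t : List (Int × Int)) :
    p.foldl (fun t pos => t ++ [pos]) t = t ++ p := by
  induction p generalizing t with
  | nil => simp
  | cons x xs ih => simp [List.foldl_cons, ih]

theorem pv_outer_foldl (l : List (List (Int × Int)))
    (f : List (Int × Int) → List (Int × Int)) (acc : List (List (Int × Int))) :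
    l.foldl (fun ans p => ans ++ [f p]) acc = acc ++ l.map f := by
  induction l generalizing acc with
  | nil => simp
  | cons x xs ih => simp [List.foldl_cons, ih]

theorem pvRec_eq_aux (n : Nat) : ∀ (remaining path : List (Int × Int)), remaining.length ≤ n →
    pvRec path remaining
      = (PySem.List.permutations remaining remaining.length).map (path ++ ·) := by
  induction n with
  | zero =>
    intro remaining path hle
    have : remaining = [] := List.eq_nil_of_length_eq_zero (by omega)
    subst this
    simp [pvRec]
  | succ n ih =>
    intro remaining path hle
    match remaining with
    | [] => simp [pvRec]
    | (r :: rs) =>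
      rw [pvRec, if_neg (by simp),
        pv_flatMap_attach (List.range (r :: rs).length)
          (fun i => pvRec (path ++ [(r :: rs).getD i (0, 0)])
            (List.take i (r :: rs) ++ List.drop (i + 1) (r :: rs)))]
      have hlen : (r :: rs).length = rs.length + 1 := rfl
      rw [show PySem.List.permutations (r :: rs) (r :: rs).length
            = PySem.List.permutations (r :: rs) (rs.length + 1) from rfl,
          PySem.List.permutations, List.map_flatMap]
      apply List.flatMap_congr
      intro i himem
      have hi : i < (r :: rs).length := List.mem_range.mp himem
      have hget : (r :: rs)[i]? = some ((r :: rs).getD i (0, 0)) := by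
        simp [List.getD, List.getElem?_eq_getElem hi]
      have herase : (r :: rs).take i ++ (r :: rs).drop (i + 1) = (r :: rs).eraseIdx i :=
        (List.eraseIdx_eq_take_drop_succ _ _).symm
      have hlen' : ((r :: rs).eraseIdx i).length = rs.length := by
        rw [List.length_eraseIdx_of_lt hi]; simp
      rw [herase, ih _ _ (by simp at hle ⊢; omega), hget, hlen']
      simp [List.map_map, Function.comp]

theorem pvRec_eq (remaining : List (Int × Int)) (path : List (Int × Int)) :
    pvRec path remaining
      = (PySem.List.permutations remaining remaining.length).map (path ++ ·) :=
  pvRec_eq_aux remaining.length remaining path le_rfl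

-- ===== VERDICT (by name: the statement is the Claim_ definition above) =====
theorem get_travels_lists_spec : Claim_equal_get_travels_lists := by
  intro POI_list start _
  show _ = _
  unfold get_travels_lists get_travels_lists_alt
  rw [pvRec_eq, pv_outer_foldl]
  simp only [List.nil_append]
  apply List.map_congr_left
  intro p _
  rw [pv_inner_foldl]
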